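-- pv_equiv track=rewrite | github.com/Vnukochpok/Game-1000 | logic1000.py | classic
-- ===== SOURCE A (Python) =====
-- def classic(arr):
--     score = 0
--     for i in range(len(arr)):
--         if arr[i] == 1:
--             score+=10
--         elif arr[i] == 5:
--             score+=5
--         else:
--             pass
--     return score
-- ===== SOURCE B (Python) =====
-- def classic(arr):
--     return arr.count(1) * 10 + arr.count(5) * 5
-- ===== Notes on version B (the rewrite author's own statement) =====
-- stated objective: simpler
-- what changed: Replaces the index loop with per-element branching and an accumulator by two whole-list counts combined in a closed-form weighted sum.
import Mathlib
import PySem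

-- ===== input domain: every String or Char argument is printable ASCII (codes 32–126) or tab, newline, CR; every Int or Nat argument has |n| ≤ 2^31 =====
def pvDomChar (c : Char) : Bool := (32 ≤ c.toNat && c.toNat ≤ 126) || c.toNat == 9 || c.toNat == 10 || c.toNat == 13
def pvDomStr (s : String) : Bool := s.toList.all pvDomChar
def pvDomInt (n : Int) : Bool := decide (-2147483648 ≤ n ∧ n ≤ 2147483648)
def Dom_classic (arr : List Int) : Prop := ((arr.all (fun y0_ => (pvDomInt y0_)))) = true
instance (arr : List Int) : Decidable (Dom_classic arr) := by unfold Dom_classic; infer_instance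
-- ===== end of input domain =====

-- B replaces A's index loop with an accumulator by two whole-list counts in a closed-form weighted sum (simpler).

-- ===== PORT A =====
-- for i in range(len(arr)): if arr[i]==1: score+=10 elif arr[i]==5: score+=5
def classic (arr : List Int) : Int :=
  (PySem.List.pyRange 0 (arr.length : Int) 1).foldl
    (fun score i =>
      -- arr[i]; index i always in range, so the default is never used
      if PySem.List.pyGetD arr i 0 = 1 then score + 10
      else if PySem.List.pyGetD arr i 0 = 5 then score + 5 else score) 0

-- ===== PORT B =====
def classic_alt (arr : List Int) : Int :=
  (PySem.List.count arr 1 : Int) * 10 + (PySem.List.count arr 5 : Int) * 5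

-- ===== PRECONDITION & SPEC =====
def Spec_classic (arr : List Int) (out : Int) : Prop := out = classic_alt arr
instance (arr : List Int) (out : Int) : Decidable (Spec_classic arr out) := by unfold Spec_classic; infer_instance

-- ===== CLAIM (what is proved, stated in full; the proofs are below) =====
def Claim_equal_classic : Prop := ∀ (arr : List Int), Dom_classic arr → Spec_classic arr (classic arr)

-- ===== LEMMAS AND PROOFS =====
theorem classic_foldl (arr : List Int) (s : Int) :
    arr.foldl (fun score x => if x = 1 then score + 10 else if x = 5 then score + 5 else score) s
      = s + (arr.count 1 : Int) * 10 + (arr.count 5 : Int) * 5 := by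
  induction arr generalizing s with
  | nil => simp
  | cons a t ih =>
    simp only [List.foldl_cons, ih, List.count_cons]
    by_cases h1 : a = 1
    · simp [h1]; ring
    · by_cases h5 : a = 5
      · simp [h5]; ring
      · simp [h1, h5]

-- ===== VERDICT (by name: the statement is the Claim_ definition above) =====
theorem classic_spec : Claim_equal_classic := by
  intro arr _
  unfold Spec_classic classic classic_alt
  rw [PySem.List.foldl_pyRange_pyGetD' arr 0
        (fun score x => if x = 1 then score + 10 else if x = 5 then score + 5 else score) 0
        (a := 0) le_rfl]
  simp [classic_foldl, PySem.List.count]
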